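-- pv_equiv track=rewrite | github.com/yuvalluria/rhoai-mcp | src/rhoai_mcp/evaluation/metrics.py | _count_backtracking
-- ===== SOURCE A (Python) =====
-- def _count_backtracking(sequence: list[str]) -> int:
--     """Count how many times the agent repeated earlier steps."""
--     seen: dict[str, int] = {}
--     backtracking = 0
--
--     for i, tool in enumerate(sequence):
--         if tool in seen:
--             # This tool was seen before, check if it's backtracking
--             # (i.e., appearing again after other tools were called)
--             last_seen = seen[tool]
--             if i > last_seen + 1:
--                 backtracking += 1
--         seen[tool] = i
--
--     return backtracking
-- ===== SOURCE B (Python) =====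
-- def _count_backtracking(sequence: list[str]) -> int:
--     """Count how many times the agent repeated earlier steps."""
--     positions: dict[str, list[int]] = {}
--     for i, tool in enumerate(sequence):
--         positions.setdefault(tool, []).append(i)
--     total = 0
--     for idxs in positions.values():
--         for prev, cur in zip(idxs, idxs[1:]):
--             if cur - prev > 1:
--                 total += 1
--     return total
-- ===== Notes on version B (the rewrite author's own statement) =====
-- stated objective: alternative
-- what changed: Replaces A's single incremental last-seen scan with a two-phase computation: first build an index mapping each tool to the ordered list of its positions, then count, per tool, consecutive position pairs whose gap exceeds 1 and sum these counts.
import Mathlib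
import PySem

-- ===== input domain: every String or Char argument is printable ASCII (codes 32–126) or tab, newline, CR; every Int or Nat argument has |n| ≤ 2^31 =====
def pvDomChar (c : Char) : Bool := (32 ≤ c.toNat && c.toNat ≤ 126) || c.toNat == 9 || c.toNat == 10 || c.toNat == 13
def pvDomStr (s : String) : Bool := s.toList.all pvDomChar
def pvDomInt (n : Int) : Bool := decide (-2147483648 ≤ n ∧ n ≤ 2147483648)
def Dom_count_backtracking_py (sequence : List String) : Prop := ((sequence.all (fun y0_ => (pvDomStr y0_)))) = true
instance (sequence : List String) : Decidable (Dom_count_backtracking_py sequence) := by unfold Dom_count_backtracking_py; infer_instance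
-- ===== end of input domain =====

-- B replaces A's single incremental last-seen scan by two phases: build a tool -> ordered
-- position-list index, then count consecutive position pairs with gap > 1 (alternative decomposition; not claimed faster).


-- ===== PORT A =====
-- loop body of A's 'for i, tool in enumerate(sequence)'
def cbStepA (st : PySem.Dict String Int × Int) (p : Int × String) : PySem.Dict String Int × Int :=
  let seen := st.1
  let backtracking := st.2
  let i := p.1
  let tool := p.2
  let backtracking :=
    if seen.contains tool then
      let last_seen := seen.getD tool 0
      if i > last_seen + 1 then backtracking + 1 else backtracking
    else backtracking
  (seen.insert tool i, backtracking)

def count_backtracking_py (sequence : List String) : Int :=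
  ((PySem.List.enumerate sequence 0).foldl cbStepA (PySem.Dict.empty, 0)).2

-- ===== PORT B =====
-- phase 1 of B: 'positions.setdefault(tool, []).append(i)' over enumerate(sequence)
def cbIndex (sequence : List String) : PySem.Dict String (List Int) :=
  (PySem.List.enumerate sequence 0).foldl
    (fun d p => d.modify p.2 [] (· ++ [p.1])) PySem.Dict.empty

-- phase 2 of B: 'for idxs in positions.values(): for prev, cur in zip(idxs, idxs[1:]): …'
def count_backtracking_py_alt (sequence : List String) : Int :=
  (cbIndex sequence).values.foldl
    (fun total idxs =>
      (idxs.zip (PySem.List.slice idxs (some 1) none)).foldl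
        (fun t q => if q.2 - q.1 > 1 then t + 1 else t) total)
    0

-- ===== PRECONDITION & SPEC =====
def Spec_count_backtracking_py (sequence : List String) (out : Int) : Prop := out = count_backtracking_py_alt sequence
instance (sequence : List String) (out : Int) : Decidable (Spec_count_backtracking_py sequence out) := by unfold Spec_count_backtracking_py; infer_instance

-- ===== CLAIM (what is proved, stated in full; the proofs are below) =====
def Claim_equal_count_backtracking_py : Prop := ∀ (sequence : List String), Dom_count_backtracking_py sequence → Spec_count_backtracking_py sequence (count_backtracking_py sequence)

-- ===== LEMMAS AND PROOFS =====

-- number of consecutive pairs with gap > 1 in a position list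
def gapCount (m : List Int) : Int := ((m.zip m.tail).countP (fun q => decide (1 < q.2 - q.1)) : Int)

-- positions (first components) of the pairs whose second component is t
def posIdx (t : String) (l : List (Int × String)) : List Int :=
  (l.filter (fun p => p.2 == t)).map (·.1)

-- the contribution of appending position i for tool x after history l
def delta (l : List (Int × String)) (i : Int) (x : String) : Int :=
  match (posIdx x l).getLast? with
  | none => 0
  | some j => if 1 < i - j then 1 else 0

-- total gap count of an enumerate-style list, tool by tool
def Gsum (l : List (Int × String)) : Int :=
  ((PySem.Set.ofList (l.map (·.2))).map (fun t => gapCount (posIdx t l))).sum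

theorem gapCount_cons_cons (a b : Int) (t : List Int) :
    gapCount (a :: b :: t) = (if 1 < b - a then 1 else 0) + gapCount (b :: t) := by
  simp only [gapCount, List.tail_cons, List.zip_cons_cons, List.countP_cons]
  push_cast
  split_ifs <;> simp_all <;> ring

theorem gapCount_append (m : List Int) (i : Int) :
    gapCount (m ++ [i]) = gapCount m +
      (match m.getLast? with | none => 0 | some j => if 1 < i - j then 1 else 0) := by
  induction m with
  | nil => simp [gapCount]
  | cons a m ih =>
    cases m with
    | nil => simp [gapCount]
    | cons b m' =>
      rw [List.cons_append, List.cons_append, gapCount_cons_cons, ← List.cons_append,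
        gapCount_cons_cons, List.getLast?_cons_cons]
      simp only [List.cons_append] at ih ⊢
      rw [ih]
      ring

theorem posIdx_append (t : String) (l1 l2 : List (Int × String)) :
    posIdx t (l1 ++ l2) = posIdx t l1 ++ posIdx t l2 := by
  simp [posIdx]

theorem posIdx_singleton (t : String) (i : Int) (x : String) :
    posIdx t [(i, x)] = if x = t then [i] else [] := by
  by_cases h : x = t <;> simp [posIdx, h]

theorem posIdx_ne (t : String) (l : List (Int × String)) (i : Int) (x : String) (h : t ≠ x) :
    posIdx t (l ++ [(i, x)]) = posIdx t l := by
  rw [posIdx_append, posIdx_singleton, if_neg (fun hx => h hx.symm), List.append_nil]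

theorem posIdx_self (l : List (Int × String)) (i : Int) (x : String) :
    posIdx x (l ++ [(i, x)]) = posIdx x l ++ [i] := by
  rw [posIdx_append, posIdx_singleton, if_pos rfl]

theorem posIdx_nil_of_not_mem (x : String) (l : List (Int × String))
    (h : x ∉ l.map (·.2)) : posIdx x l = [] := by
  simp only [posIdx, List.map_eq_nil_iff, List.filter_eq_nil_iff]
  intro p hp
  simp only [beq_iff_eq]
  exact fun he => h (List.mem_map.mpr ⟨p, hp, he⟩)

-- pointwise update of a sum over a Nodup list: only x's summand changes, by d
theorem sum_map_update (S : List String) (hS : S.Nodup) (x : String) (hx : x ∈ S)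
    (f g : String → Int) (d : Int)
    (hne : ∀ t ∈ S, t ≠ x → g t = f t) (hgx : g x = f x + d) :
    (S.map g).sum = (S.map f).sum + d := by
  induction S with
  | nil => cases hx
  | cons a S ih =>
    rcases List.mem_cons.mp hx with rfl | hx'
    · have : ∀ t ∈ S, g t = f t := fun t ht =>
        hne t (List.mem_cons_of_mem _ ht) (fun he => (List.nodup_cons.mp hS).1 (he ▸ ht))
      have hmap : S.map g = S.map f := List.map_congr_left this
      simp [hgx, hmap]; ring
    · have ha : g a = f a := hne a (List.mem_cons_self) (fun he => (List.nodup_cons.mp hS).1 (he ▸ hx'))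
      have := ih (List.nodup_cons.mp hS).2 hx' (fun t ht hne' => hne t (List.mem_cons_of_mem _ ht) hne')
      simp [ha, this]; ring

theorem Gsum_append_singleton (l : List (Int × String)) (i : Int) (x : String) :
    Gsum (l ++ [(i, x)]) = Gsum l + delta l i x := by
  unfold Gsum
  have hmap : (l ++ [(i, x)]).map (·.2) = l.map (·.2) ++ [x] := by simp
  rw [hmap, PySem.Set.ofList_append_singleton]
  set S := PySem.Set.ofList (l.map (·.2)) with hSdef
  have hnd : S.Nodup := PySem.Set.nodup_ofList _
  have hgx : gapCount (posIdx x (l ++ [(i, x)])) = gapCount (posIdx x l) + delta l i x := by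
    rw [posIdx_self, gapCount_append]; rfl
  by_cases hxS : x ∈ S
  · rw [PySem.Set.add_of_mem hxS]
    exact sum_map_update S hnd x hxS _ _ (delta l i x)
      (fun t _ ht => by rw [posIdx_ne t l i x ht]) hgx
  · rw [PySem.Set.add_of_not_mem hxS]
    have hxl : x ∉ l.map (·.2) := fun h => hxS ((PySem.Set.mem_ofList _ _).mpr h)
    have hpx : posIdx x l = [] := posIdx_nil_of_not_mem x l hxl
    have hdelta : delta l i x = 0 := by rw [delta, hpx]; rfl
    have hG : ∀ t ∈ S, gapCount (posIdx t (l ++ [(i, x)])) = gapCount (posIdx t l) := by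
      intro t ht
      rw [posIdx_ne t l i x (fun he => hxS (he ▸ ht))]
    rw [List.map_append, List.map_congr_left hG]
    simp only [List.map_cons, List.map_nil, List.sum_append, List.sum_cons, List.sum_nil]
    rw [hgx, hpx, hdelta]
    simp [gapCount]

-- core correspondence: A's remaining loop, given the last-seen invariant for the prefix
theorem A_loop (rest : List String) (p : List String)
    (seen : PySem.Dict String Int) (back : Int)
    (hseen : ∀ t, seen.get? t = (posIdx t (PySem.List.enumerate p 0)).getLast?) :
    ((PySem.List.enumerate rest (p.length : Int)).foldl cbStepA (seen, back)).2
      = back + Gsum (PySem.List.enumerate (p ++ rest) 0) - Gsum (PySem.List.enumerate p 0) := by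
  induction rest generalizing p seen back with
  | nil => simp [PySem.List.enumerate_nil]
  | cons tool rest ih =>
    rw [PySem.List.enumerate_cons, List.foldl_cons]
    have henum : PySem.List.enumerate (p ++ [tool]) 0
        = PySem.List.enumerate p 0 ++ [((p.length : Int), tool)] := by
      rw [PySem.List.enumerate_append]
      simp [PySem.List.enumerate_cons, PySem.List.enumerate_nil]
    -- A's step
    have hstep : cbStepA (seen, back) ((p.length : Int), tool)
        = (seen.insert tool (p.length : Int),
           back + delta (PySem.List.enumerate p 0) (p.length : Int) tool) := by
      show (seen.insert tool (p.length : Int),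
        if seen.contains tool = true then
          (if (p.length : Int) > seen.getD tool 0 + 1 then back + 1 else back)
        else back) = _
      congr 1
      cases hlast : (posIdx tool (PySem.List.enumerate p 0)).getLast? with
      | none =>
        have hc : seen.contains tool = false := by
          rw [PySem.Dict.contains_eq_isSome_get?, hseen, hlast]; rfl
        have hd : delta (PySem.List.enumerate p 0) (p.length : Int) tool = 0 := by
          simp [delta, hlast]
        rw [if_neg (by simp [hc]), hd]; ring
      | some j =>
        have hget : seen.get? tool = some j := by rw [hseen, hlast]
        have hc : seen.contains tool = true := by
          rw [PySem.Dict.contains_eq_isSome_get?, hget]; rfl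
        have hgetD : seen.getD tool 0 = j := by rw [PySem.Dict.getD_eq_get?_getD, hget]; rfl
        rw [if_pos hc, hgetD]
        have hd : delta (PySem.List.enumerate p 0) (p.length : Int) tool
            = if 1 < (p.length : Int) - j then 1 else 0 := by
          simp [delta, hlast]
        rw [hd]
        by_cases hlt : 1 < (p.length : Int) - j
        · rw [if_pos (by omega : (p.length : Int) > j + 1), if_pos hlt]
        · rw [if_neg (by omega), if_neg hlt]; ring
    rw [hstep]
    -- invariant for the extended prefix
    have hseen' : ∀ t, (seen.insert tool (p.length : Int)).get? t
        = (posIdx t (PySem.List.enumerate (p ++ [tool]) 0)).getLast? := by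
      intro t
      rw [henum]
      by_cases ht : t = tool
      · subst ht
        rw [PySem.Dict.get?_insert_self, posIdx_self, List.getLast?_concat]
      · rw [PySem.Dict.get?_insert_of_ne _ _ ht, posIdx_ne t _ _ _ ht, hseen]
    have hlen : (((p ++ [tool]).length : Int)) = (p.length : Int) + 1 := by
      simp
    have hih := ih (p ++ [tool]) (seen.insert tool (p.length : Int))
      (back + delta (PySem.List.enumerate p 0) (p.length : Int) tool) hseen'
    rw [hlen] at hih
    rw [hih, henum, Gsum_append_singleton, List.append_assoc]
    simp only [List.singleton_append]
    ring

-- B computes Gsum of the enumerated sequence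
theorem B_eq_Gsum (sequence : List String) :
    count_backtracking_py_alt sequence = Gsum (PySem.List.enumerate sequence 0) := by
  unfold count_backtracking_py_alt Gsum
  have hgaps : ∀ (total : Int) (idxs : List Int),
      (idxs.zip (PySem.List.slice idxs (some 1) none)).foldl
        (fun t q => if q.2 - q.1 > 1 then t + 1 else t) total
      = total + gapCount idxs := by
    intro total idxs
    rw [PySem.List.slice_from_one, gapCount]
    exact PySem.List.foldl_ite_add_one _ _ _
  have h1 : (cbIndex sequence).values.foldl
      (fun total idxs =>
        (idxs.zip (PySem.List.slice idxs (some 1) none)).foldl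
          (fun t q => if q.2 - q.1 > 1 then t + 1 else t) total) 0
      = 0 + ((cbIndex sequence).values.map gapCount).sum := by
    rw [← PySem.List.foldl_add]
    exact PySem.List.foldl_congr_mem _ _ _ _ (fun acc x _ => hgaps acc x)
  rw [h1, zero_add]
  -- keys and lookups of the phase-1 index
  have hnd : (cbIndex sequence).keys.Nodup := by
    unfold cbIndex
    exact PySem.Dict.nodup_keys_foldl_modify_key _ _ _ _ _ PySem.Dict.nodup_keys_empty
  have hkeys : (cbIndex sequence).keys = PySem.Set.ofList (sequence) := by
    unfold cbIndex
    rw [PySem.Dict.keys_foldl_modify_key]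
    rw [PySem.List.map_snd_enumerate]
    simp [PySem.Dict.keys_empty, PySem.Set.update_nil_left]
  have hgetD : ∀ c, (cbIndex sequence).getD c [] = posIdx c (PySem.List.enumerate sequence 0) := by
    intro c
    unfold cbIndex
    have : ∀ (l : List (Int × String)) (d : PySem.Dict String (List Int)),
        (l.foldl (fun d p => d.modify p.2 [] (· ++ [p.1])) d).getD c []
          = d.getD c [] ++ posIdx c l := by
      intro l
      induction l with
      | nil => intro d; simp [posIdx]
      | cons q l ihl =>
        intro d
        rw [List.foldl_cons, ihl]
        by_cases hq : c = q.2
        · subst hq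
          rw [PySem.Dict.getD_modify, if_pos rfl]
          simp [posIdx, List.append_assoc]
        · rw [PySem.Dict.getD_modify, if_neg hq]
          simp [posIdx, Ne.symm hq]
    rw [this]
    simp [posIdx]
  rw [PySem.Dict.values_eq_map_keys _ hnd [], hkeys, List.map_map,
    PySem.List.map_snd_enumerate]
  congr 1
  apply List.map_congr_left
  intro t _
  simp only [Function.comp_apply]
  rw [hgetD t]

-- ===== VERDICT (by name: the statement is the Claim_ definition above) =====
theorem count_backtracking_py_spec : Claim_equal_count_backtracking_py := by
  intro sequence _
  show count_backtracking_py sequence = count_backtracking_py_alt sequence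
  unfold count_backtracking_py
  have h := A_loop sequence [] PySem.Dict.empty 0
    (fun t => by simp [posIdx, PySem.List.enumerate_nil, PySem.Dict.get?_empty])
  simp only [List.length_nil, Int.natCast_zero, List.nil_append] at h
  rw [h, B_eq_Gsum]
  simp [Gsum, PySem.List.enumerate_nil]
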